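-- pv_equiv track=rewrite | github.com/marcmelis/advent_of_code | 2023/day12/12-1.py | generate_springs
-- ===== SOURCE A (Python) =====
-- from itertools import product
--
-- def generate_springs(spring):
--     num_unk = spring.count('?')
--     combinations = product('.#',repeat=num_unk)
--     springs = []
--     for combination in combinations:
--         new_spring = ''
--         posibilties = iter(combination)
--         for char in spring:
--             if char == '?':
--                 new_spring += next(posibilties)
--             else:
--                 new_spring += char
--         springs.append(new_spring)
--     return springs
-- ===== SOURCE B (Python) =====
-- def generate_springs(spring):
--     def go(suffix, prefix, out):
--         j = suffix.find('?')
--         if j == -1: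
--             out.append(prefix + suffix)
--         else:
--             go(suffix[j + 1:], prefix + suffix[:j] + '.', out)
--             go(suffix[j + 1:], prefix + suffix[:j] + '#', out)
--     out = []
--     go(spring, '', out)
--     return out
-- ===== Notes on version B (the rewrite author's own statement) =====
-- stated objective: faster
-- what changed: Replaced the itertools.product enumeration (count the unknowns, pre-generate all combinations, then re-scan the whole string character by character for each combination) by recursive backtracking that jumps directly between unknowns with str.find, accumulating a prefix, trying the operational char before the damaged one at each unknown.
import Mathlib
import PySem

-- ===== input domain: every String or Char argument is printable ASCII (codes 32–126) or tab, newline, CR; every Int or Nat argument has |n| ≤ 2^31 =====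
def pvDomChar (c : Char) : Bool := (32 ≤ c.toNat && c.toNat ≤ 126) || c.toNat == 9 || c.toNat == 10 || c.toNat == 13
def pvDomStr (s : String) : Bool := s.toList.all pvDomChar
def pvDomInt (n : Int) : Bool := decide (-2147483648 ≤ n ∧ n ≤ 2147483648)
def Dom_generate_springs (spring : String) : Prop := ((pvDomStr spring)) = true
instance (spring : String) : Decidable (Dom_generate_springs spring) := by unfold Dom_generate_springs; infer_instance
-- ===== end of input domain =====

-- B replaces A's itertools.product enumeration by recursive backtracking that jumps from '?' to '?' ('.' tried before '#'); alternative decomposition, same output order.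

-- ===== PORT A =====
-- itertools.product('.#', repeat=n): the leftmost position varies slowest
def pvProd : Nat → List (List Char)
  | 0 => [[]]
  | n + 1 => ['.', '#'].flatMap (fun c => (pvProd n).map (fun t => c :: t))

-- the inner 'for char in spring' loop: state = (new_spring so far as acc, the iterator's
-- remaining elements as poss); next(posibilties) never exhausts since |comb| = count '?'
def pvFill : List Char → List Char → List Char → List Char
  | [], acc, _ => acc
  | c :: cs, acc, poss =>
    if c = '?' then pvFill cs (acc ++ [poss.headD '?']) poss.tail
    else pvFill cs (acc ++ [c]) poss

def generate_springs (spring : String) : List String :=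
  let num_unk := PySem.Str.count spring "?"
  (pvProd num_unk).map (fun comb => String.ofList (pvFill spring.toList [] comb))

-- ===== PORT B =====
-- go(suffix, prefix): suffix.find('?') = takeWhile/dropWhile split; no '?' left → emit
-- prefix + suffix; otherwise recurse past the '?' with '.' then with '#'
def pvGo (cs pref : List Char) : List (List Char) :=
  let pre := cs.takeWhile (fun c => c != '?')
  match h : cs.dropWhile (fun c => c != '?') with
  | [] => [pref ++ pre]
  | _ :: tl => pvGo tl (pref ++ pre ++ ['.']) ++ pvGo tl (pref ++ pre ++ ['#'])
termination_by cs.length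
decreasing_by all_goals
  have h1 : (cs.dropWhile (fun c => c != '?')).length ≤ cs.length :=
    cs.length_dropWhile_le _
  rw [h] at h1; simp at h1; omega

def generate_springs_alt (spring : String) : List String :=
  (pvGo spring.toList []).map String.ofList

-- ===== PRECONDITION & SPEC =====
def Spec_generate_springs (spring : String) (out : List String) : Prop := out = generate_springs_alt spring
instance (spring : String) (out : List String) : Decidable (Spec_generate_springs spring out) := by unfold Spec_generate_springs; infer_instance

-- ===== CLAIM (what is proved, stated in full; the proofs are below) =====
def Claim_equal_generate_springs : Prop := ∀ (spring : String), Dom_generate_springs spring → Spec_generate_springs spring (generate_springs spring)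

-- ===== LEMMAS AND PROOFS =====

-- Python str.count of the one-character pattern '?' is the per-character count
theorem pv_count_go_singleton (s : List Char) (fuel acc : Nat) (h : s.length ≤ fuel) :
    PySem.Chars.count.go ['?'] fuel s acc = acc + s.count '?' := by
  induction s generalizing fuel acc with
  | nil => cases fuel <;> simp [PySem.Chars.count.go]
  | cons c cs ih =>
    cases fuel with
    | zero => simp at h
    | succ n =>
      simp only [List.length_cons, Nat.succ_le_succ_iff] at h
      by_cases hc : c = '?'
      · subst hc
        simp [PySem.Chars.count.go, List.isPrefixOf, ih _ _ h]
        omega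
      · simp [PySem.Chars.count.go, List.isPrefixOf, hc, Ne.symm hc, ih _ _ h]

theorem pv_count_singleton (s : List Char) :
    PySem.Chars.count s ['?'] = s.count '?' := by
  simp [PySem.Chars.count, pv_count_go_singleton s s.length 0 le_rfl]

-- sliding A's substitution pass over a '?'-free chunk only moves the chunk into the accumulator
theorem pv_fill_no_q (pre : List Char) (hp : '?' ∉ pre) :
    ∀ (cs acc poss : List Char), pvFill (pre ++ cs) acc poss = pvFill cs (acc ++ pre) poss := by
  induction pre with
  | nil => intro cs acc poss; simp
  | cons c pre ih =>
    intro cs acc poss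
    simp only [List.mem_cons, not_or] at hp
    simp [pvFill, Ne.symm hp.1, ih hp.2, List.append_assoc]

-- backtracking = map the substitution pass over the product of the remaining '?' count
theorem pv_go_eq (cs : List Char) : ∀ pref : List Char,
    pvGo cs pref = (pvProd (cs.count '?')).map (fun comb => pvFill cs pref comb) := by
  induction hn : cs.length using Nat.strong_induction_on generalizing cs with
  | _ n ih =>
  intro pref
  have hsplit : cs.takeWhile (fun c => c != '?') ++ cs.dropWhile (fun c => c != '?') = cs :=
    cs.takeWhile_append_dropWhile
  have hpre : '?' ∉ cs.takeWhile (fun c => c != '?') := by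
    intro hmem
    have := List.mem_takeWhile_imp hmem
    simp at this
  rw [pvGo]
  cases hd : cs.dropWhile (fun c => c != '?') with
  | nil =>
    rw [hd] at hsplit; simp only [List.append_nil] at hsplit
    have hcnt : cs.count '?' = 0 := by
      rw [← hsplit]; exact List.count_eq_zero.mpr hpre
    rw [hcnt]
    conv_rhs => rw [← hsplit]
    have hf := pv_fill_no_q _ hpre [] pref []
    simp only [List.append_nil] at hf
    simp [pvProd, hf, pvFill]
  | cons d tl =>
    have hdq : d = '?' := by
      have := cs.head_dropWhile_not (p := fun c => c != '?')
      rw [hd] at this; simpa using this (by simp)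
    subst hdq
    rw [hd] at hsplit
    have hlen : tl.length < n := by
      have h1 : (cs.dropWhile (fun c => c != '?')).length ≤ cs.length :=
        cs.length_dropWhile_le _
      rw [hd] at h1; simp at h1; omega
    have hcnt : cs.count '?' = tl.count '?' + 1 := by
      rw [← hsplit, List.count_append, List.count_eq_zero.mpr hpre, List.count_cons]
      simp
    rw [hcnt]
    conv_rhs => rw [← hsplit]
    simp only [pvProd, List.flatMap_cons, List.flatMap_nil, List.append_nil,
      List.map_append, List.map_map, ih _ hlen tl rfl]
    congr 1 <;>
      (apply List.map_congr_left; intro t _;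
       simp [Function.comp, pv_fill_no_q _ hpre, pvFill])

-- ===== VERDICT (by name: the statement is the Claim_ definition above) =====
theorem generate_springs_spec : Claim_equal_generate_springs := by
  intro spring _
  show generate_springs spring = generate_springs_alt spring
  have hq : ("?" : String).toList = ['?'] := by decide
  simp [generate_springs, generate_springs_alt, PySem.Str.count_eq, hq,
    pv_count_singleton, pv_go_eq, List.map_map, Function.comp]
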